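-- pv_equiv track=rewrite | github.com/pypi-data/pypi-mirror-237 | packages/hak/hak-0.0.204.tar.gz/hak-0.0.204/hak/string/insert/new_line_before_new_line_and_cea_.py | f
-- ===== SOURCE A (Python) =====
-- def f(x):
--   for (before, after) in [
--     ('\n_', '\n\n_'),
--     ('\nc', '\n\nc'),
--     ('\ne', '\n\ne'),
--     ('\na', '\n\na'),
--   ]:
--     x = x.replace(before, after)
--   return x
-- ===== SOURCE B (Python) =====
-- def f(x):
--   out = []
--   n = len(x)
--   for i in range(n):
--     ch = x[i]
--     out.append(ch)
--     if ch == '\n' and i + 1 < n and x[i + 1] in '_cea':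
--       out.append('\n')
--   return ''.join(out)
-- ===== Notes on version B (the rewrite author's own statement) =====
-- stated objective: alternative
-- what changed: Replaces four sequential full-string str.replace passes by one left-to-right indexed scan that emits an extra newline whenever a newline is immediately followed by one of the four trigger characters.
import Mathlib
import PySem

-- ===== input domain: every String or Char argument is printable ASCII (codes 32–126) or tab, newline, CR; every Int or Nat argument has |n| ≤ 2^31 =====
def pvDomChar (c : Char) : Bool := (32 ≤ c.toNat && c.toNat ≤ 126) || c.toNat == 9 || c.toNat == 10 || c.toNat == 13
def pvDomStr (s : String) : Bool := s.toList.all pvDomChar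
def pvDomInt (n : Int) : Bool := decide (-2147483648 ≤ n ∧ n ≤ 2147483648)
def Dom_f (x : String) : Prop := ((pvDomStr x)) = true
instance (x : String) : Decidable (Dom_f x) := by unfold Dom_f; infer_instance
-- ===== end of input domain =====

-- B replaces A's four sequential str.replace passes by one left-to-right scan that
-- doubles each newline followed by a trigger character (objective: alternative, a single pass).

-- ===== PORT A =====
-- literal transliteration: the for-loop over (before, after) pairs is a foldl doing x = x.replace(before, after)
def f (x : String) : String :=
  [("\n_", "\n\n_"), ("\nc", "\n\nc"), ("\ne", "\n\ne"), ("\na", "\n\na")].foldl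
    (fun acc p => PySem.Str.replace acc p.1 p.2) x

-- ===== PORT B =====
-- B's scan: emit each char; after a '\n' whose successor is in '_cea', emit one extra '\n'
def insB (S : Char → Bool) : List Char → List Char
  | [] => []
  | a :: t =>
      if (a == '\n') && (match t with | b :: _ => S b | [] => false) then
        a :: '\n' :: insB S t
      else
        a :: insB S t

def f_alt (x : String) : String :=
  String.ofList (insB (fun c => ['_', 'c', 'e', 'a'].contains c) x.toList)

-- ===== PRECONDITION & SPEC =====
def Spec_f (x : String) (out : String) : Prop := out = f_alt x
instance (x : String) (out : String) : Decidable (Spec_f x out) := by unfold Spec_f; infer_instance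

-- ===== CLAIM (what is proved, stated in full; the proofs are below) =====
def Claim_equal_f : Prop := ∀ (x : String), Dom_f x → Spec_f x (f x)

-- ===== LEMMAS AND PROOFS =====

theorem insB_nil (S : Char → Bool) : insB S [] = [] := rfl

theorem insB_single (S : Char → Bool) (a : Char) : insB S [a] = [a] := by
  simp [insB]

theorem insB_cons₂ (S : Char → Bool) (a b : Char) (u : List Char) :
    insB S (a :: b :: u)
      = if (a == '\n') && S b then a :: '\n' :: insB S (b :: u) else a :: insB S (b :: u) := rfl

-- insB with a pointwise-equal predicate gives the same output
theorem insB_congr (S T : Char → Bool) (h : ∀ c, S c = T c) :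
    ∀ l : List Char, insB S l = insB T l := by
  intro l
  induction l with
  | nil => rfl
  | cons a t ih =>
      cases t with
      | nil => simp [insB]
      | cons b u => rw [insB_cons₂, insB_cons₂, h b, ih]

-- one replace of '\n'++c by '\n\n'++c (c ≠ '\n') is the single-character scan insB (· == c)
theorem replace_go_eq_insB (c : Char) (hc : c ≠ '\n') :
    ∀ (fuel : Nat) (l acc : List Char), l.length ≤ fuel →
      PySem.Chars.replace.go ['\n', c] ['\n', '\n', c] fuel l acc
        = acc.reverse ++ insB (· == c) l := by
  intro fuel
  induction fuel with
  | zero =>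
      intro l acc hl
      have : l = [] := by
        cases l with
        | nil => rfl
        | cons a t => simp at hl
      subst this
      simp [PySem.Chars.replace.go, insB]
  | succ n ih =>
      intro l acc hl
      cases l with
      | nil => simp [PySem.Chars.replace.go, insB]
      | cons a t =>
          cases t with
          | nil =>
              have hp : List.isPrefixOf ['\n', c] [a] = false := by
                simp [List.isPrefixOf]
              simp only [PySem.Chars.replace.go, hp, Bool.false_eq_true, if_false]
              rw [ih [] (a :: acc) (by simp)]
              simp [insB_single, insB_nil]
          | cons b u =>
              by_cases hp : List.isPrefixOf ['\n', c] (a :: b :: u) = true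
              · have hab : '\n' = a ∧ c = b := by
                  simpa [List.isPrefixOf] using hp
                obtain ⟨ha, hb⟩ := hab
                subst ha; subst hb
                simp only [PySem.Chars.replace.go, hp, if_true]
                have hdrop : List.drop (['\n', c].length) ('\n' :: c :: u) = u := by simp
                rw [hdrop]
                have hu : u.length ≤ n := by simp at hl; omega
                rw [ih u (['\n', '\n', c].reverse ++ acc) hu]
                have h1 : insB (· == c) ('\n' :: c :: u) = '\n' :: '\n' :: insB (· == c) (c :: u) := by
                  rw [insB_cons₂]; simp
                have h2 : insB (· == c) (c :: u) = c :: insB (· == c) u := by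
                  cases u with
                  | nil => exact insB_single _ _
                  | cons d v =>
                      rw [insB_cons₂]
                      have : (c == '\n') = false := by
                        simp [hc]
                      simp [this]
                rw [h1, h2]
                simp
              · simp only [PySem.Chars.replace.go]
                rw [if_neg hp]
                have ht : (b :: u).length ≤ n := by simp at hl ⊢; omega
                rw [ih (b :: u) (a :: acc) ht]
                have hcond : ((a == '\n') && (b == c)) = false := by
                  cases h1 : a == '\n' <;> cases h2 : b == c <;> simp_all [List.isPrefixOf]
                rw [insB_cons₂]
                simp [hcond]

theorem replace_eq_insB (c : Char) (hc : c ≠ '\n') (l : List Char) :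
    PySem.Chars.replace l ['\n', c] ['\n', '\n', c] = insB (· == c) l := by
  have h := replace_go_eq_insB c hc l.length l [] (le_refl _)
  simpa [PySem.Chars.replace] using h

theorem toList_replace_insB (s o n2 : String) (c : Char) (hc : c ≠ '\n')
    (ho : o.toList = ['\n', c]) (hn : n2.toList = ['\n', '\n', c]) :
    (PySem.Str.replace s o n2).toList = insB (· == c) s.toList := by
  rw [PySem.Str.toList_replace, ho, hn]
  exact replace_eq_insB c hc s.toList

-- the head of insB on a cons is the original head
theorem insB_cons_head (S : Char → Bool) (b : Char) (u : List Char) :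
    ∃ r, insB S (b :: u) = b :: r := by
  cases u with
  | nil => exact ⟨[], insB_single _ _⟩
  | cons d v =>
      by_cases h : ((b == '\n') && S d) = true
      · exact ⟨'\n' :: insB S (d :: v), by rw [insB_cons₂, if_pos h]⟩
      · exact ⟨insB S (d :: v), by rw [insB_cons₂, if_neg h]⟩

-- two scans with disjoint, newline-free target sets compose into one scan over the union
theorem insB_comp (S T : Char → Bool)
    (hT : T '\n' = false) (hd : ∀ c, T c = true → S c = false) :
    ∀ l : List Char, insB T (insB S l) = insB (fun c => S c || T c) l := by
  intro l
  induction l with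
  | nil => rfl
  | cons a t ih =>
      cases t with
      | nil => simp [insB_single]
      | cons b u =>
          obtain ⟨r, hr⟩ := insB_cons_head S b u
          by_cases hS : ((a == '\n') && S b) = true
          · obtain ⟨ha, hSb⟩ : a = '\n' ∧ S b = true := by
              simpa using hS
            subst ha
            have hTb : T b = false := by
              cases hTb : T b with
              | false => rfl
              | true => rw [hd b hTb] at hSb; simp at hSb
            rw [insB_cons₂, if_pos hS, hr]
            have s1 : insB T ('\n' :: '\n' :: b :: r) = '\n' :: insB T ('\n' :: b :: r) := by
              rw [insB_cons₂]; simp [hT]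
            have s2 : insB T ('\n' :: b :: r) = '\n' :: insB T (b :: r) := by
              rw [insB_cons₂]; simp [hTb]
            rw [s1, s2, ← hr, ih]
            rw [insB_cons₂]
            simp [hSb]
          · rw [insB_cons₂, if_neg hS, hr]
            by_cases hTc : ((a == '\n') && T b) = true
            · obtain ⟨ha, hTb⟩ : a = '\n' ∧ T b = true := by
                simpa using hTc
              subst ha
              have hSb : S b = false := hd b hTb
              have s1 : insB T ('\n' :: b :: r) = '\n' :: '\n' :: insB T (b :: r) := by
                rw [insB_cons₂]; simp [hTb]
              rw [s1, ← hr, ih]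
              rw [insB_cons₂]
              simp [hSb, hTb]
            · have s1 : insB T (a :: b :: r) = a :: insB T (b :: r) := by
                rw [insB_cons₂, if_neg hTc]
              rw [s1, ← hr, ih]
              have hcond : ((a == '\n') && (S b || T b)) = false := by
                simp only [Bool.and_eq_true] at hS hTc
                by_cases h1 : (a == '\n') = true
                · have h2 : S b = false := by
                    cases h2 : S b with
                    | false => rfl
                    | true => exact absurd ⟨h1, h2⟩ hS
                  have h3 : T b = false := by
                    cases h3 : T b with
                    | false => rfl
                    | true => exact absurd ⟨h1, h3⟩ hTc
                  simp [h2, h3]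
                · simp only [Bool.not_eq_true] at h1
                  simp [h1]
              rw [insB_cons₂, if_neg (by simp [hcond])]

-- ===== VERDICT (by name: the statement is the Claim_ definition above) =====
theorem f_spec : Claim_equal_f := by
  intro x _
  unfold Spec_f
  apply String.toList_injective
  show (f x).toList = (f_alt x).toList
  unfold f f_alt
  simp only [List.foldl, String.toList_ofList]
  rw [toList_replace_insB _ _ _ 'a' (by decide) (by decide) (by decide)]
  rw [toList_replace_insB _ _ _ 'e' (by decide) (by decide) (by decide)]
  rw [toList_replace_insB _ _ _ 'c' (by decide) (by decide) (by decide)]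
  rw [toList_replace_insB _ _ _ '_' (by decide) (by decide) (by decide)]
  rw [insB_comp (· == '_') (· == 'c') (by decide)
        (fun c h => by simp only [beq_iff_eq] at h; subst h; decide)]
  rw [insB_comp (fun c => (c == '_') || (c == 'c')) (· == 'e') (by decide)
        (fun c h => by simp only [beq_iff_eq] at h; subst h; decide)]
  rw [insB_comp (fun c => ((c == '_') || (c == 'c')) || (c == 'e')) (· == 'a') (by decide)
        (fun c h => by simp only [beq_iff_eq] at h; subst h; decide)]
  apply insB_congr
  intro c
  simp only [List.contains_cons, List.contains_nil, Bool.or_false]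
  ac_rfl
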